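-- pv_equiv track=rewrite | github.com/Rachum-thu/TaxoCite | data/raw/util/md2seg.py | segment_markdown
-- ===== SOURCE A (Python) =====
-- def segment_markdown(md_content):
--     """Parse markdown and add <block> tags around content sections."""
--     lines = md_content.split('\n')
--     result = []
--     block_id = 0
--     in_block = False
--
--     for line in lines:
--         # Check if this is a ## or ### header (block boundary)
--         if line.startswith('### ') or line.startswith('## '):
--             # Close previous block if open
--             if in_block:
--                 result.append('</block>')
--                 in_block = False
--
--             # Add the header line
--             result.append(line)
--
--             # Start new block
--             result.append(f'<block id="{block_id}">')
--             block_id += 1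
--             in_block = True
--         else:
--             # Regular content line
--             result.append(line)
--
--     # Close final block if still open
--     if in_block:
--         result.append('</block>')
--
--     return '\n'.join(result)
-- ===== SOURCE B (Python) =====
-- def segment_markdown(md_content):
--     """Parse markdown and add <block> tags around content sections.
--
--     Recursive segmentation: split the lines at header boundaries and build
--     each block (header, open tag, body, close tag) as one unit.
--     """
--     lines = md_content.split('\n')
--
--     def is_hdr(l):
--         return l.startswith('### ') or l.startswith('## ')
--
--     def seg(rest, k):
--         # rest[0] is a header line (or rest is empty)
--         if not rest:
--             return []
--         head = rest[0]
--         j = 1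
--         while j < len(rest) and not is_hdr(rest[j]):
--             j += 1
--         return ([head, '<block id="{}">'.format(k)] + rest[1:j]
--                 + ['</block>'] + seg(rest[j:], k + 1))
--
--     j0 = 0
--     while j0 < len(lines) and not is_hdr(lines[j0]):
--         j0 += 1
--     return '\n'.join(lines[:j0] + seg(lines[j0:], 0))
-- ===== Notes on version B (the rewrite author's own statement) =====
-- stated objective: alternative
-- what changed: Replaced A's single stateful pass (block_id/in_block flags with a trailing close fix-up) by a recursive segmentation that splits the lines at header boundaries and emits each block (header, open tag, body, close tag) as one unit.
import Mathlib
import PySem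

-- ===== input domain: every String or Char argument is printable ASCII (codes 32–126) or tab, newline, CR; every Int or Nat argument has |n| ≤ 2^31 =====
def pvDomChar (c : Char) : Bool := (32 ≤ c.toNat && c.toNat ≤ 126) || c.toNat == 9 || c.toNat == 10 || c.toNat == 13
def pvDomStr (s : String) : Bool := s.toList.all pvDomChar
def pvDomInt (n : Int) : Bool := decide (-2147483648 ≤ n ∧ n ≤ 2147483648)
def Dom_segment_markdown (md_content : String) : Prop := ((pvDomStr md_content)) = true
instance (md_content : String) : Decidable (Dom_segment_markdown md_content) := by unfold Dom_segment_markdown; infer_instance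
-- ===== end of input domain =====

-- B restructures A's single stateful pass (in_block/block_id flags) into a recursive
-- segmentation at header boundaries; same output, objective: alternative decomposition.

-- shared helpers: the header test and the open tag (identical text in both Pythons)
def pvIsHdr (l : String) : Bool :=
  PySem.Str.startswith l "### " || PySem.Str.startswith l "## "

def pvTag (k : Int) : String := "<block id=\"" ++ PySem.Int.toStr k ++ "\">"

-- md_content.split('\n'); sep ≠ "" so split? always returns some
def pvLines (md_content : String) : List String :=
  (PySem.Str.split? md_content "\n").getD []

-- ===== PORT A =====
-- A's loop body (the state is (result, block_id, in_block))
def pvStep (st : List String × Int × Bool) (line : String) : List String × Int × Bool :=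
  if pvIsHdr line then
    ((if st.2.2 then st.1 ++ ["</block>"] else st.1) ++ [line] ++ [pvTag st.2.1],
     st.2.1 + 1, true)
  else
    (st.1 ++ [line], st.2.1, st.2.2)

def segment_markdown (md_content : String) : String :=
  let st := (pvLines md_content).foldl pvStep ([], 0, false)
  let res := if st.2.2 then st.1 ++ ["</block>"] else st.1
  PySem.Str.join "\n" res

-- ===== PORT B =====
-- B's seg: rest[0] is a header; body = lines up to the next header (the j-scan = span)
def pvSeg (k : Int) : List String → List String
  | [] => []
  | head :: rest =>
      [head, pvTag k] ++ rest.takeWhile (fun l => !pvIsHdr l) ++ ["</block>"] ++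
        pvSeg (k + 1) (rest.dropWhile (fun l => !pvIsHdr l))
termination_by ls => ls.length
decreasing_by
  simp only [List.length_cons]
  exact Nat.lt_succ_of_le (List.length_dropWhile_le _ _)

def segment_markdown_alt (md_content : String) : String :=
  let lines := pvLines md_content
  let pre := lines.takeWhile (fun l => !pvIsHdr l)        -- lines[:j0], the j0-scan
  let rest := lines.dropWhile (fun l => !pvIsHdr l)       -- lines[j0:]
  PySem.Str.join "\n" (pre ++ pvSeg 0 rest)

-- ===== PRECONDITION & SPEC =====
def Spec_segment_markdown (md_content : String) (out : String) : Prop := out = segment_markdown_alt md_content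
instance (md_content : String) (out : String) : Decidable (Spec_segment_markdown md_content out) := by unfold Spec_segment_markdown; infer_instance

-- ===== CLAIM (what is proved, stated in full; the proofs are below) =====
def Claim_equal_segment_markdown : Prop := ∀ (md_content : String), Dom_segment_markdown md_content → Spec_segment_markdown md_content (segment_markdown md_content)

-- ===== LEMMAS AND PROOFS =====

theorem pvSeg_nil (k : Int) : pvSeg k [] = [] := by
  rw [pvSeg.eq_def]

theorem pvSeg_cons (k : Int) (head : String) (rest : List String) :
    pvSeg k (head :: rest) =
      [head, pvTag k] ++ rest.takeWhile (fun l => !pvIsHdr l) ++ ["</block>"] ++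
        pvSeg (k + 1) (rest.dropWhile (fun l => !pvIsHdr l)) := by
  rw [pvSeg.eq_def]

-- finalize A's fold state (the trailing close-if-in_block)
def pvFin (st : List String × Int × Bool) : List String :=
  if st.2.2 then st.1 ++ ["</block>"] else st.1

theorem pvFold_true (ls : List String) : ∀ (res : List String) (b : Int),
    pvFin (ls.foldl pvStep (res, b, true)) =
      res ++ ls.takeWhile (fun l => !pvIsHdr l) ++
        "</block>" :: pvSeg b (ls.dropWhile (fun l => !pvIsHdr l)) := by
  induction ls with
  | nil =>
    intro res b
    simp only [List.foldl_nil, List.takeWhile_nil, List.dropWhile_nil, pvSeg_nil]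
    simp [pvFin]
  | cons l ls ih =>
    intro res b
    by_cases h : pvIsHdr l = true
    · rw [List.foldl_cons]
      have hs : pvStep (res, b, true) l =
          (res ++ ["</block>"] ++ [l] ++ [pvTag b], b + 1, true) := by
        simp [pvStep, h]
      rw [hs, ih]
      have ht : List.takeWhile (fun l => !pvIsHdr l) (l :: ls) = [] := by simp [h]
      have hd : List.dropWhile (fun l => !pvIsHdr l) (l :: ls) = l :: ls := by simp [h]
      rw [ht, hd, pvSeg_cons]
      simp
    · rw [List.foldl_cons]
      have hs : pvStep (res, b, true) l = (res ++ [l], b, true) := by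
        simp [pvStep, h]
      rw [hs, ih]
      simp [h]

theorem pvFold_false (ls : List String) : ∀ (res : List String) (b : Int),
    pvFin (ls.foldl pvStep (res, b, false)) =
      res ++ ls.takeWhile (fun l => !pvIsHdr l) ++
        pvSeg b (ls.dropWhile (fun l => !pvIsHdr l)) := by
  induction ls with
  | nil =>
    intro res b
    simp only [List.foldl_nil, List.takeWhile_nil, List.dropWhile_nil, pvSeg_nil]
    simp [pvFin]
  | cons l ls ih =>
    intro res b
    by_cases h : pvIsHdr l = true
    · rw [List.foldl_cons]
      have hs : pvStep (res, b, false) l = (res ++ [l] ++ [pvTag b], b + 1, true) := by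
        simp [pvStep, h]
      rw [hs, pvFold_true]
      have ht : List.takeWhile (fun l => !pvIsHdr l) (l :: ls) = [] := by simp [h]
      have hd : List.dropWhile (fun l => !pvIsHdr l) (l :: ls) = l :: ls := by simp [h]
      rw [ht, hd, pvSeg_cons]
      simp
    · rw [List.foldl_cons]
      have hs : pvStep (res, b, false) l = (res ++ [l], b, false) := by
        simp [pvStep, h]
      rw [hs, ih]
      simp [h]

-- ===== VERDICT (by name: the statement is the Claim_ definition above) =====
theorem segment_markdown_spec : Claim_equal_segment_markdown := by
  intro md _
  unfold Spec_segment_markdown segment_markdown segment_markdown_alt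
  have h := pvFold_false (pvLines md) [] 0
  simp only [pvFin] at h
  simp only [h, List.nil_append]
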